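-- pv_equiv track=rewrite | github.com/Alexerson/adventofcode | src/y2019/day8.py | merge_layers
-- ===== SOURCE A (Python) =====
-- def merge_pixels(values):
--     for value in values:
--         if value != '2':
--             return value
--
-- def merge_layers(layers):
--     height = len(layers[0])
--     width = len(layers[0][0])
--
--     image = []
--     for _ in range(height):
--         image.append([])
--
--     for y in range(height):
--         for x in range(width):
--             image[y].append(merge_pixels([layer[y][x] for layer in layers]))
--
--     return image
-- ===== SOURCE B (Python) =====
-- def merge_layers(layers):
--     height = len(layers[0])
--     width = len(layers[0][0])
--     image = [[None] * width for _ in range(height)]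
--     for layer in reversed(layers):
--         for y in range(height):
--             for x in range(width):
--                 pixel = layer[y][x]
--                 if pixel != '2':
--                     image[y][x] = pixel
--     return image
-- ===== Notes on version B (the rewrite author's own statement) =====
-- stated objective: alternative
-- what changed: per-pixel scan for the first non-transparent layer is replaced by a single bottom-to-top overwrite pass over a None-initialised grid (reversed layer order, top-most non-'2' pixel written last wins)
import Mathlib
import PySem

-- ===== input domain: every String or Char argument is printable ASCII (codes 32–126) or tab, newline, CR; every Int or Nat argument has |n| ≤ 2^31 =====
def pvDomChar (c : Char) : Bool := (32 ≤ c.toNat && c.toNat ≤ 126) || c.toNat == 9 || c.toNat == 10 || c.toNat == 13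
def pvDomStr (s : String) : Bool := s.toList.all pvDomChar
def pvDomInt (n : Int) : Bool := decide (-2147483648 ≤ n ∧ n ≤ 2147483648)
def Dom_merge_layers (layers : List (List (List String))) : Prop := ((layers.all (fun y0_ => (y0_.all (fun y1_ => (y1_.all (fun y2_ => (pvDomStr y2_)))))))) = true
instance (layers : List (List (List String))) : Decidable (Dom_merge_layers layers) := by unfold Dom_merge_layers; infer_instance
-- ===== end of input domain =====

-- B replaces the per-pixel scan for the first non-transparent layer by a single
-- bottom-to-top overwrite pass over a None-initialised grid (alternative decomposition, same cost).

-- ===== PORT A =====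
-- first value ≠ '2', None if all are '2'
def merge_pixels : List String → Option String
  | [] => none
  | v :: vs => if v ≠ "2" then some v else merge_pixels vs

-- the nested append loops become maps over the same ranges; indexing is safe under Pre_
def merge_layers (layers : List (List (List String))) : List (List (Option String)) :=
  let height := (layers.headD []).length
  let width := ((layers.headD []).headD []).length
  (List.range height).map (fun y =>
    (List.range width).map (fun x =>
      merge_pixels (layers.map (fun layer => (layer.getD y []).getD x ""))))

-- ===== PORT B =====
-- one bottom-to-top pass of B's triple loop, updating the grid in place
def mlOverlay (layer : List (List String)) (image : List (List (Option String))) :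
    List (List (Option String)) :=
  image.mapIdx (fun y row => row.mapIdx (fun x cell =>
    let pixel := (layer.getD y []).getD x ""
    if pixel ≠ "2" then some pixel else cell))

def merge_layers_alt (layers : List (List (List String))) : List (List (Option String)) :=
  let height := (layers.headD []).length
  let width := ((layers.headD []).headD []).length
  let init := (List.range height).map (fun _ => (List.range width).map (fun _ => (none : Option String)))
  layers.reverse.foldl (fun image layer => mlOverlay layer image) init

-- ===== PRECONDITION & SPEC =====
-- Pre_: exactly the inputs where Python A returns (no IndexError): layers and its first
-- layer nonempty, and (unless width = 0, when no layer is ever indexed) every layer has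
-- ≥ height rows whose first height rows have ≥ width pixels.
def Pre_merge_layers (layers : List (List (List String))) : Prop :=
  layers ≠ [] ∧ (layers.headD []) ≠ [] ∧
  ((layers.headD []).headD [] = [] ∨
    ∀ layer ∈ layers, (layers.headD []).length ≤ layer.length ∧
      ∀ row ∈ layer.take (layers.headD []).length,
        ((layers.headD []).headD []).length ≤ row.length)
instance (layers : List (List (List String))) : Decidable (Pre_merge_layers layers) := by
  unfold Pre_merge_layers; infer_instance

def pvWitness_merge_layers : List (List (List String)) :=
  [[["1", "2"], ["0", "2"]], [["2", "0"], ["2", "1"]]]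

def Spec_merge_layers (layers : List (List (List String))) (out : List (List (Option String))) : Prop := out = merge_layers_alt layers
instance (layers : List (List (List String))) (out : List (List (Option String))) : Decidable (Spec_merge_layers layers out) := by unfold Spec_merge_layers; infer_instance

-- ===== CLAIM (what is proved, stated in full; the proofs are below) =====
def Claim_equal_merge_layers : Prop := ∀ (layers : List (List (List String))), Dom_merge_layers layers → Pre_merge_layers layers → Spec_merge_layers layers (merge_layers layers)

-- ===== LEMMAS AND PROOFS =====
theorem mapIdx_range_map {α β : Type} (n : Nat) (f : Nat → α) (g : Nat → α → β) :
    List.mapIdx g ((List.range n).map f) = (List.range n).map (fun i => g i (f i)) := by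
  apply List.ext_getElem <;> simp

theorem overlay_fold (height width : Nat) (layers : List (List (List String))) :
    layers.reverse.foldl (fun image layer => mlOverlay layer image)
      ((List.range height).map (fun _ => (List.range width).map (fun _ => (none : Option String))))
    = (List.range height).map (fun y => (List.range width).map (fun x =>
        merge_pixels (layers.map (fun layer => (layer.getD y []).getD x "")))) := by
  rw [List.foldl_reverse]
  induction layers with
  | nil => simp [merge_pixels]
  | cons L rest ih =>
      rw [List.foldr_cons, ih]
      simp only [mlOverlay, mapIdx_range_map, List.map_cons]
      refine List.map_congr_left (fun y _ => ?_)
      refine List.map_congr_left (fun x _ => ?_)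
      by_cases h : (L.getD y []).getD x "" = "2" <;> simp [merge_pixels, h]


-- ===== VERDICT (by name: the statement is the Claim_ definition above) =====
theorem merge_layers_spec : Claim_equal_merge_layers := by
  intro layers _ _
  unfold Spec_merge_layers merge_layers merge_layers_alt
  exact (overlay_fold _ _ _).symm
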